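-- pv_equiv track=rewrite | github.com/fsladkey/advent-of-code | 2.py | bathroom_security
-- ===== SOURCE A (Python) =====
-- char_to_dir = {"R": (0, 1), "U": (-1, 0), "D": (1, 0), "L": (0, -1)}
--
-- def try_inc(num, val, keypad):
--     newNum = num + val
--     return num if newNum < 0 or newNum >= len(keypad) else newNum
--
-- def bathroom_security(input, kp):
--     steps = input.split("\n")
--     pos = [2, 0]
--     result = []
--     for step in steps:
--         for char in step:
--             dir = char_to_dir[char]
--             next = [try_inc(num, dir[x], kp) for x, num in enumerate(pos)]
--             x, y = next
--             if kp[x][y] is not None: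
--                 pos = next
--         x, y = pos
--         result.append(kp[x][y])
--     return "".join(list(map(str, result)))
-- ===== SOURCE B (Python) =====
-- def bathroom_security(input, kp):
--     n = len(kp)
--     moves = {"R": (0, 1), "U": (-1, 0), "D": (1, 0), "L": (0, -1)}
--     trans = {}
--     for x in range(n):
--         for y in range(n):
--             for c, (dx, dy) in moves.items():
--                 tx, ty = x + dx, y + dy
--                 if 0 <= tx < n and 0 <= ty < n and kp[tx][ty] is not None:
--                     trans[(x, y, c)] = (tx, ty)
--                 else:
--                     trans[(x, y, c)] = (x, y)
--     pos = (2, 0)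
--     out = []
--     for line in input.split("\n"):
--         for c in line:
--             pos = trans[(pos[0], pos[1], c)]
--         out.append(str(kp[pos[0]][pos[1]]))
--     return "".join(out)
-- ===== Notes on version B (the rewrite author's own statement) =====
-- stated objective: alternative
-- what changed: B first scans the keypad once to precompute a (position, move-char) -> position transition table that folds the bounds-clamp and the None-validity check into the table, so the walk over the input is pure table lookups with no arithmetic or branches.
-- outside the precondition, e.g. on bathroom_security('U', [['1'], ['2']]): A returns '2', B raises IndexError; on bathroom_security('', [['1', '2', '3'], ['4'], ['7', '8', '9']]): A returns '7', B raises IndexError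
import Mathlib
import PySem

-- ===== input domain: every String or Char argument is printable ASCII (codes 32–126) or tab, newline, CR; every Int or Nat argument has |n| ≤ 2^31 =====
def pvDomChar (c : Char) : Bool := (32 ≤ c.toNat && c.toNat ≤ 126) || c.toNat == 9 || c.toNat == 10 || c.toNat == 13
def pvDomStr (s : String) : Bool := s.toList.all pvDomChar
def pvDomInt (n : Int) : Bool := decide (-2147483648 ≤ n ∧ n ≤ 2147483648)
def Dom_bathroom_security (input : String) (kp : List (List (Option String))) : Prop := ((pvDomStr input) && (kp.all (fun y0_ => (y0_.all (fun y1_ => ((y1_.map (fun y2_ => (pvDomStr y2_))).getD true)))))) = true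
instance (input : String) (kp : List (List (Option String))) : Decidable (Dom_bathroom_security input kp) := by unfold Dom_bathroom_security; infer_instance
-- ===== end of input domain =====

-- B replaces A's per-character clamp/validity arithmetic by a transition table precomputed in one
-- scan of the keypad; the walk itself is pure table lookups (objective: alternative).

-- ===== PORT A =====
-- shared primitive: kp[x][y] (total form of the double pyGet?; indices are in range under Pre_)
def kpAt (kp : List (List (Option String))) (x y : Int) : Option String :=
  PySem.List.pyGetD (PySem.List.pyGetD kp x []) y none

-- Python str() on a cell (a str or None)
def pyStr : Option String → String
  | none => "None"
  | some s => s

def charToDir : PySem.Dict String (Int × Int) :=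
  PySem.Dict.ofList [("R", (0, 1)), ("U", (-1, 0)), ("D", (1, 0)), ("L", (0, -1))]

def tryInc (num val : Int) (keypad : List (List (Option String))) : Int :=
  let newNum := num + val
  if newNum < 0 ∨ (keypad.length : Int) ≤ newNum then num else newNum

def bathroom_security (input : String) (kp : List (List (Option String))) : String :=
  let steps := (PySem.Str.split? input "\n").getD []
  let st := steps.foldl
    (fun (st : (Int × Int) × List (Option String)) step =>
      let pos := step.toList.foldl
        (fun (pos : Int × Int) char =>
          -- dir = char_to_dir[char]  (KeyError excluded by Pre_; default keeps pos fixed)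
          let dir := charToDir.getD (String.ofList [char]) (0, 0)
          let next := (tryInc pos.1 dir.1 kp, tryInc pos.2 dir.2 kp)
          if kpAt kp next.1 next.2 ≠ none then next else pos) st.1
      (pos, st.2 ++ [kpAt kp pos.1 pos.2])) ((2, 0), [])
  PySem.Str.join "" (st.2.map pyStr)

-- ===== PORT B =====
def bMoves : List (Char × Int × Int) := [('R', 0, 1), ('U', -1, 0), ('D', 1, 0), ('L', 0, -1)]

def bTarget (n : Int) (kp : List (List (Option String))) (x y : Int) (m : Char × Int × Int) :
    Int × Int :=
  let tx := x + m.2.1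
  let ty := y + m.2.2
  if 0 ≤ tx ∧ tx < n ∧ 0 ≤ ty ∧ ty < n ∧ kpAt kp tx ty ≠ none then (tx, ty) else (x, y)

def buildTrans (n : Int) (kp : List (List (Option String))) :
    PySem.Dict (Int × Int × Char) (Int × Int) :=
  (PySem.List.pyRange 0 n 1).foldl (fun d x =>
    (PySem.List.pyRange 0 n 1).foldl (fun d y =>
      bMoves.foldl (fun d m => d.insert (x, y, m.1) (bTarget n kp x y m)) d) d) PySem.Dict.empty

def bathroom_security_alt (input : String) (kp : List (List (Option String))) : String :=
  let n : Int := kp.length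
  let trans := buildTrans n kp
  let st := ((PySem.Str.split? input "\n").getD []).foldl
    (fun (st : (Int × Int) × List String) line =>
      let pos := line.toList.foldl
        -- pos = trans[(pos, c)]  (KeyError excluded by Pre_; default keeps pos fixed)
        (fun (pos : Int × Int) c => trans.getD (pos.1, pos.2, c) pos) st.1
      (pos, st.2 ++ [pyStr (kpAt kp pos.1 pos.2)])) ((2, 0), [])
  PySem.Str.join "" st.2

-- ===== PRECONDITION & SPEC =====
-- Pre_ excludes inputs with characters outside R/U/D/L/newline (A raises KeyError) and grids that
-- are not at least 3 rows with every row at least as long as the row count: on such ragged grids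
-- A's survival depends on which cells the walk happens to touch (it can still return), while B's
-- whole-grid precompute touches cells A never reads and raises there.
def Pre_bathroom_security (input : String) (kp : List (List (Option String))) : Prop :=
  (input.toList.all (fun c => c == 'R' || c == 'U' || c == 'D' || c == 'L' || c == '\n')
    && decide (3 ≤ kp.length)
    && kp.all (fun row => kp.length ≤ row.length)) = true
instance (input : String) (kp : List (List (Option String))) :
    Decidable (Pre_bathroom_security input kp) := by unfold Pre_bathroom_security; infer_instance

def pvWitness_bathroom_security : String × List (List (Option String)) :=
  ("ULL\nRRDDD", [[some "1", some "2", some "3"],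
                  [some "4", some "5", some "6"],
                  [some "7", none, some "9"]])

def Spec_bathroom_security (input : String) (kp : List (List (Option String))) (out : String) :
    Prop := out = bathroom_security_alt input kp
instance (input : String) (kp : List (List (Option String))) (out : String) :
    Decidable (Spec_bathroom_security input kp out) := by unfold Spec_bathroom_security; infer_instance

-- ===== CLAIM (what is proved, stated in full; the proofs are below) =====
def Claim_equal_bathroom_security : Prop :=
  ∀ (input : String) (kp : List (List (Option String))), Dom_bathroom_security input kp →
    Pre_bathroom_security input kp →
    Spec_bathroom_security input kp (bathroom_security input kp)

-- ===== LEMMAS AND PROOFS =====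

-- A's inner per-character step, named for the proofs
def stepA (kp : List (List (Option String))) (pos : Int × Int) (char : Char) : Int × Int :=
  let dir := charToDir.getD (String.ofList [char]) (0, 0)
  let next := (tryInc pos.1 dir.1 kp, tryInc pos.2 dir.2 kp)
  if kpAt kp next.1 next.2 ≠ none then next else pos

def inRange (kp : List (List (Option String))) (p : Int × Int) : Prop :=
  0 ≤ p.1 ∧ p.1 < kp.length ∧ 0 ≤ p.2 ∧ p.2 < kp.length

-- the flat list of table entries B's triple loop inserts, in insertion order
def entries (n : Int) : List (Int × Int × (Char × Int × Int)) :=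
  (PySem.List.pyRange 0 n 1).flatMap (fun x =>
    (PySem.List.pyRange 0 n 1).flatMap (fun y => bMoves.map (fun m => (x, y, m))))

theorem buildTrans_eq (n : Int) (kp : List (List (Option String))) :
    buildTrans n kp = (entries n).foldl
      (fun d e => d.insert (e.1, e.2.1, e.2.2.1) (bTarget n kp e.1 e.2.1 e.2.2))
      PySem.Dict.empty := by
  simp [buildTrans, entries, List.foldl_flatMap, List.foldl_map]

theorem getD_fold_ins_notmem {α : Type} (l : List α) (key : α → Int × Int × Char)
    (val : α → Int × Int) (d0 : PySem.Dict (Int × Int × Char) (Int × Int))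
    (k : Int × Int × Char) (dflt : Int × Int) (h : ∀ a ∈ l, key a ≠ k) :
    (l.foldl (fun d a => d.insert (key a) (val a)) d0).getD k dflt = d0.getD k dflt := by
  induction l generalizing d0 with
  | nil => rfl
  | cons b t ih =>
    simp only [List.foldl_cons]
    rw [ih _ (fun a ha => h a (List.mem_cons_of_mem _ ha)),
      PySem.Dict.getD_insert]
    rw [if_neg (fun he => absurd he.symm (h b (List.mem_cons_self ..)))]

theorem getD_fold_ins_mem {α : Type} (l : List α) (key : α → Int × Int × Char)
    (val : α → Int × Int) (d0 : PySem.Dict (Int × Int × Char) (Int × Int))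
    (k : Int × Int × Char) (dflt v : Int × Int)
    (h : ∀ b ∈ l, key b = k → val b = v) (hex : ∃ a ∈ l, key a = k) :
    (l.foldl (fun d a => d.insert (key a) (val a)) d0).getD k dflt = v := by
  induction l generalizing d0 with
  | nil => simp at hex
  | cons b t ih =>
    simp only [List.foldl_cons]
    by_cases hc : ∃ a ∈ t, key a = k
    · exact ih _ (fun a ha hk => h a (List.mem_cons_of_mem _ ha) hk) hc
    · have hc' : ∀ a ∈ t, key a ≠ k := fun a ha hk => hc ⟨a, ha, hk⟩
      have hb : key b = k := by
        rcases hex with ⟨a, ha, hk⟩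
        rcases List.mem_cons.1 ha with rfl | ha
        · exact hk
        · exact absurd hk (hc' a ha)
      rw [getD_fold_ins_notmem _ _ _ _ _ _ hc', PySem.Dict.getD_insert]
      simp [hb, h b (List.mem_cons_self ..) hb]

theorem bMoves_fst_inj : ∀ m ∈ bMoves, ∀ m' ∈ bMoves, m.1 = m'.1 → m = m' := by decide

theorem charToDir_miss (c : Char) (h : ∀ m ∈ bMoves, m.1 ≠ c) :
    charToDir.getD (String.ofList [c]) (0, 0) = (0, 0) := by
  have hR : String.ofList [c] ≠ "R" := fun he => by
    have := congrArg String.toList he; simp at this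
    exact h _ (by decide : ('R', (0:Int), (1:Int)) ∈ bMoves) this.symm
  have hU : String.ofList [c] ≠ "U" := fun he => by
    have := congrArg String.toList he; simp at this
    exact h _ (by decide : ('U', (-1:Int), (0:Int)) ∈ bMoves) this.symm
  have hD : String.ofList [c] ≠ "D" := fun he => by
    have := congrArg String.toList he; simp at this
    exact h _ (by decide : ('D', (1:Int), (0:Int)) ∈ bMoves) this.symm
  have hL : String.ofList [c] ≠ "L" := fun he => by
    have := congrArg String.toList he; simp at this
    exact h _ (by decide : ('L', (0:Int), (-1:Int)) ∈ bMoves) this.symm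
  have hd : charToDir = PySem.Dict.mk
      [("R", ((0:Int), (1:Int))), ("U", (-1, 0)), ("D", (1, 0)), ("L", (0, -1))] := by decide
  rw [hd, PySem.Dict.getD_eq_get?_getD]
  rw [PySem.Dict.get?_mk_cons, PySem.Dict.get?_mk_cons, PySem.Dict.get?_mk_cons,
    PySem.Dict.get?_mk_cons]
  simp only [beq_iff_eq]
  rw [if_neg (Ne.symm hR), if_neg (Ne.symm hU), if_neg (Ne.symm hD), if_neg (Ne.symm hL)]
  rfl

theorem lookR : charToDir.getD (String.ofList ['R']) (0, 0) = ((0 : Int), (1 : Int)) := by decide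
theorem lookU : charToDir.getD (String.ofList ['U']) (0, 0) = ((-1 : Int), (0 : Int)) := by decide
theorem lookD : charToDir.getD (String.ofList ['D']) (0, 0) = ((1 : Int), (0 : Int)) := by decide
theorem lookL : charToDir.getD (String.ofList ['L']) (0, 0) = ((0 : Int), (-1 : Int)) := by decide

theorem tryInc_eq (a v : Int) (kp : List (List (Option String))) :
    tryInc a v kp = if a + v < 0 ∨ (kp.length : Int) ≤ a + v then a else a + v := rfl

theorem caseR (kp : List (List (Option String))) (x y : Int)
    (hx : 0 ≤ x) (hx' : x < kp.length) (hy : 0 ≤ y) (hy' : y < kp.length) :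
    bTarget kp.length kp x y ('R', 0, 1) = stepA kp (x, y) 'R' := by
  simp only [bTarget, stepA, lookR, tryInc_eq, add_zero]
  by_cases hb : y + 1 < (kp.length : Int)
  · rw [if_neg (show ¬(y + 1 < 0 ∨ (kp.length : Int) ≤ y + 1) by omega)]
    by_cases hc : kpAt kp x (y + 1) = none <;> simp [hb, hc, hx, hx'] <;> omega
  · rw [if_pos (show (y + 1 < 0 ∨ (kp.length : Int) ≤ y + 1) by omega)]
    simp [hb]

theorem caseU (kp : List (List (Option String))) (x y : Int)
    (hx : 0 ≤ x) (hx' : x < kp.length) (hy : 0 ≤ y) (hy' : y < kp.length) :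
    bTarget kp.length kp x y ('U', -1, 0) = stepA kp (x, y) 'U' := by
  simp only [bTarget, stepA, lookU, tryInc_eq, add_zero]
  by_cases hb : 0 ≤ x + -1
  · rw [if_neg (show ¬(x + -1 < 0 ∨ (kp.length : Int) ≤ x + -1) by omega)]
    by_cases hc : kpAt kp (x + -1) y = none <;> simp [hb, hc, hy, hy'] <;> omega
  · rw [if_pos (show (x + -1 < 0 ∨ (kp.length : Int) ≤ x + -1) by omega)]
    simp [hb]

theorem caseD (kp : List (List (Option String))) (x y : Int)
    (hx : 0 ≤ x) (hx' : x < kp.length) (hy : 0 ≤ y) (hy' : y < kp.length) :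
    bTarget kp.length kp x y ('D', 1, 0) = stepA kp (x, y) 'D' := by
  simp only [bTarget, stepA, lookD, tryInc_eq, add_zero]
  by_cases hb : x + 1 < (kp.length : Int)
  · rw [if_neg (show ¬(x + 1 < 0 ∨ (kp.length : Int) ≤ x + 1) by omega)]
    by_cases hc : kpAt kp (x + 1) y = none <;> simp [hb, hc, hy, hy'] <;> omega
  · rw [if_pos (show (x + 1 < 0 ∨ (kp.length : Int) ≤ x + 1) by omega)]
    simp [hb]

theorem caseL (kp : List (List (Option String))) (x y : Int)
    (hx : 0 ≤ x) (hx' : x < kp.length) (hy : 0 ≤ y) (hy' : y < kp.length) :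
    bTarget kp.length kp x y ('L', 0, -1) = stepA kp (x, y) 'L' := by
  simp only [bTarget, stepA, lookL, tryInc_eq, add_zero]
  by_cases hb : 0 ≤ y + -1
  · rw [if_neg (show ¬(y + -1 < 0 ∨ (kp.length : Int) ≤ y + -1) by omega)]
    by_cases hc : kpAt kp x (y + -1) = none <;> simp [hb, hc, hx, hx'] <;> omega
  · rw [if_pos (show (y + -1 < 0 ∨ (kp.length : Int) ≤ y + -1) by omega)]
    simp [hb]

theorem bTarget_eq_stepA (kp : List (List (Option String))) (x y : Int)
    (m : Char × Int × Int) (hm : m ∈ bMoves)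
    (hx : 0 ≤ x) (hx' : x < kp.length) (hy : 0 ≤ y) (hy' : y < kp.length) :
    bTarget kp.length kp x y m = stepA kp (x, y) m.1 := by
  simp only [bMoves, List.mem_cons, List.not_mem_nil, or_false] at hm
  rcases hm with rfl | rfl | rfl | rfl
  exacts [caseR kp x y hx hx' hy hy', caseU kp x y hx hx' hy hy',
    caseD kp x y hx hx' hy hy', caseL kp x y hx hx' hy hy']

theorem getD_buildTrans (kp : List (List (Option String))) (x y : Int) (c : Char)
    (hx : 0 ≤ x) (hx' : x < kp.length) (hy : 0 ≤ y) (hy' : y < kp.length) :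
    (buildTrans kp.length kp).getD (x, y, c) (x, y) = stepA kp (x, y) c := by
  rw [buildTrans_eq]
  by_cases hc : ∃ m ∈ bMoves, m.1 = c
  · rcases hc with ⟨m, hm, hmc⟩
    rw [getD_fold_ins_mem (α := Int × Int × (Char × Int × Int)) _
        (fun e => (e.1, e.2.1, e.2.2.1)) (fun e => bTarget kp.length kp e.1 e.2.1 e.2.2)
        _ _ _ (bTarget kp.length kp x y m)
        ?_ ⟨(x, y, m), ?_, by simp [hmc]⟩]
    · rw [bTarget_eq_stepA kp x y m hm hx hx' hy hy', hmc]
    · rintro ⟨x', y', m'⟩ hb hk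
      simp only [Prod.mk.injEq] at hk
      obtain ⟨rfl, rfl, h1⟩ := hk
      have hm' : m' ∈ bMoves := by
        simp only [entries, List.mem_flatMap, List.mem_map] at hb
        obtain ⟨_, _, _, _, _, h⟩ := hb
        obtain ⟨hw, -, -, rfl⟩ := h
        exact hw
      rw [bMoves_fst_inj m' hm' m hm (h1.trans hmc.symm)]
    · simp only [entries, List.mem_flatMap, List.mem_map, PySem.List.mem_pyRange_one]
      exact ⟨x, ⟨hx, hx'⟩, y, ⟨hy, hy'⟩, m, hm, rfl⟩
  · have hc' : ∀ m ∈ bMoves, m.1 ≠ c := fun m hm hk => hc ⟨m, hm, hk⟩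
    rw [getD_fold_ins_notmem]
    · have : stepA kp (x, y) c = (x, y) := by
        simp only [stepA, charToDir_miss c hc', tryInc]
        norm_num
      simp [PySem.Dict.getD_empty, this]
    · rintro ⟨x', y', m'⟩ hb hk
      simp only [Prod.mk.injEq] at hk
      obtain ⟨rfl, rfl, h1⟩ := hk
      have hm' : m' ∈ bMoves := by
        simp only [entries, List.mem_flatMap, List.mem_map] at hb
        obtain ⟨_, _, _, _, _, h⟩ := hb
        obtain ⟨hw, -, -, rfl⟩ := h
        exact hw
      exact hc' m' hm' h1

theorem stepA_inRange (kp : List (List (Option String))) (pos : Int × Int) (c : Char)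
    (h : inRange kp pos) : inRange kp (stepA kp pos c) := by
  obtain ⟨h1, h2, h3, h4⟩ := h
  simp only [stepA, tryInc, inRange]
  split_ifs <;> simp_all <;> omega

theorem charfold_eq (kp : List (List (Option String))) (chars : List Char) (pos : Int × Int)
    (h : inRange kp pos) :
    chars.foldl (fun p c => (buildTrans kp.length kp).getD (p.1, p.2, c) p) pos
      = chars.foldl (stepA kp) pos
    ∧ inRange kp (chars.foldl (stepA kp) pos) := by
  induction chars generalizing pos with
  | nil => exact ⟨rfl, h⟩
  | cons c t ih =>
    obtain ⟨h1, h2, h3, h4⟩ := h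
    have hstep : (buildTrans kp.length kp).getD (pos.1, pos.2, c) pos = stepA kp pos c := by
      have := getD_buildTrans kp pos.1 pos.2 c h1 h2 h3 h4
      simpa using this
    simp only [List.foldl_cons, hstep]
    exact ih _ (stepA_inRange kp pos c ⟨h1, h2, h3, h4⟩)

theorem linefold_eq (kp : List (List (Option String))) (lines : List String)
    (pos : Int × Int) (accA : List (Option String)) (h : inRange kp pos) :
    (lines.foldl
      (fun (st : (Int × Int) × List String) line =>
        let p := line.toList.foldl
          (fun (p : Int × Int) c => (buildTrans kp.length kp).getD (p.1, p.2, c) p) st.1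
        (p, st.2 ++ [pyStr (kpAt kp p.1 p.2)])) (pos, accA.map pyStr)).2
    = (lines.foldl
      (fun (st : (Int × Int) × List (Option String)) step =>
        let p := step.toList.foldl (stepA kp) st.1
        (p, st.2 ++ [kpAt kp p.1 p.2])) (pos, accA)).2.map pyStr := by
  induction lines generalizing pos accA with
  | nil => rfl
  | cons line t ih =>
    obtain ⟨heq, hr⟩ := charfold_eq kp line.toList pos h
    simp only [List.foldl_cons, heq]
    have := ih (line.toList.foldl (stepA kp) pos)
      (accA ++ [kpAt kp (line.toList.foldl (stepA kp) pos).1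
        (line.toList.foldl (stepA kp) pos).2]) hr
    simpa using this

theorem bathroom_security_spec : Claim_equal_bathroom_security := by
  intro input kp _ hpre
  unfold Pre_bathroom_security at hpre
  simp only [Bool.and_eq_true, decide_eq_true_eq] at hpre
  obtain ⟨⟨-, hlen⟩, -⟩ := hpre
  show bathroom_security input kp = bathroom_security_alt input kp
  unfold bathroom_security bathroom_security_alt
  have hr : inRange kp ((2 : Int), (0 : Int)) := by
    unfold inRange
    refine ⟨by norm_num, by omega, by norm_num, by omega⟩
  have := linefold_eq kp ((PySem.Str.split? input "\n").getD []) (2, 0) [] hr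
  simp only [List.map_nil] at this
  exact congrArg (PySem.Str.join "") this.symm
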